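-- pv_equiv track=rewrite | github.com/pig-games/MFORTH | tools/tass_to_asm485/convert_mforth_to_asm485.py | space_shifts
-- ===== SOURCE A (Python) =====
-- def is_escaped(text: str, idx: int) -> bool:
--     backslashes = 0
--     j = idx - 1
--     while j >= 0 and text[j] == "\\":
--         backslashes += 1
--         j -= 1
--     return (backslashes % 2) == 1
--
-- def space_shifts(expr: str) -> str:
--     out = []
--     i = 0
--     in_quote = False
--     while i < len(expr):
--         ch = expr[i]
--         if ch == '"' and not is_escaped(expr, i):
--             in_quote = not in_quote
--             out.append(ch)
--             i += 1
--             continue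
--         if not in_quote and expr[i:i+2] in ("<<", ">>"):
--             op = expr[i:i+2]
--             out.append(f" {op} ")
--             i += 2
--             continue
--         out.append(ch)
--         i += 1
--     return "".join(out)
-- ===== SOURCE B (Python) =====
-- def space_shifts(expr: str) -> str:
--     # One forward pass: running backslash-parity replaces is_escaped's backward
--     # rescan, and a one-char pending buffer detects "<<"/">>" without slicing.
--     pieces = []
--     in_quote = False
--     esc = False          # odd run of backslashes ends at the previous char
--     pending = ''         # a single '<' or '>' seen outside quotes, not yet emitted
--     for ch in expr:
--         if not in_quote and ch in '<>':
--             if pending == ch: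
--                 pieces.append(f" {ch}{ch} ")
--                 pending = ''
--             else:
--                 pieces.append(pending)
--                 pending = ch
--             esc = False
--             continue
--         if pending:
--             pieces.append(pending)
--             pending = ''
--         if ch == '"' and not esc:
--             in_quote = not in_quote
--         pieces.append(ch)
--         esc = (ch == '\\') and not esc
--     pieces.append(pending)
--     return ''.join(pieces)
-- ===== Notes on version B (the rewrite author's own statement) =====
-- stated objective: faster
-- what changed: Replaces A's backward rescan over all preceding backslashes at every quote (quadratic worst case) and its two-char slicing with a single forward pass keeping a running backslash-parity flag and a one-character pending buffer for shift characters.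
import Mathlib
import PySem

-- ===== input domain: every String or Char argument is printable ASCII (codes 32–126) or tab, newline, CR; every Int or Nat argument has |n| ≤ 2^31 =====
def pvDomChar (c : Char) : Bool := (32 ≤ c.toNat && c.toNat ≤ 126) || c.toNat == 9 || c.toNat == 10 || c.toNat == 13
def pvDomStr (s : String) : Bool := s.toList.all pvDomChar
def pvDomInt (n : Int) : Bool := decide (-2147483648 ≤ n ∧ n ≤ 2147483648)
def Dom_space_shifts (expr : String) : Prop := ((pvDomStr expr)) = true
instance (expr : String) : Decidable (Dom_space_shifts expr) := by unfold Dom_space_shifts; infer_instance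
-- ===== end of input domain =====

-- B replaces A's backward rescan for escape detection (O(n^2) worst case) by a
-- single pass with running backslash parity and a one-char pending buffer; measured-faster claims are left to a timing run.

-- ===== PORT A =====
-- is_escaped: the backward while loop over j = idx-1, idx-2, … becomes structural
-- recursion on the offset; countBS text idx = the number of backslashes the loop counts.
def countBS (text : List Char) : Nat → Nat
  | 0 => 0
  | j + 1 => if text[j]? = some '\\' then countBS text j + 1 else 0

def isEscaped (text : List Char) (idx : Nat) : Bool := countBS text idx % 2 == 1

-- the main while loop of A: index i, in_quote flag, out accumulator; expr[i:i+2] = (expr.drop i).take 2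
def loopA (expr : List Char) (i : Nat) (inQuote : Bool) (acc : List Char) : List Char :=
  if h : i < expr.length then
    if expr[i] == '"' && !isEscaped expr i then
      loopA expr (i + 1) (!inQuote) (acc ++ [expr[i]])
    else if !inQuote && ((expr.drop i).take 2 == ['<', '<'] || (expr.drop i).take 2 == ['>', '>']) then
      loopA expr (i + 2) inQuote (acc ++ ' ' :: (expr.drop i).take 2 ++ [' '])
    else
      loopA expr (i + 1) inQuote (acc ++ [expr[i]])
  else acc
termination_by expr.length - i

def space_shifts (expr : String) : String := String.ofList (loopA expr.toList 0 false [])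

-- ===== PORT B =====
-- the for loop of Source B: state (in_quote, esc, pending), pieces accumulated into acc
def loopB (l : List Char) (inQuote esc : Bool) (pending : Option Char) (acc : List Char) : List Char :=
  match l with
  | [] => acc ++ pending.toList
  | ch :: rest =>
    if !inQuote && (ch == '<' || ch == '>') then
      if pending == some ch then
        loopB rest inQuote false none (acc ++ [' ', ch, ch, ' '])
      else
        loopB rest inQuote false (some ch) (acc ++ pending.toList)
    else
      let acc' := acc ++ pending.toList
      if ch == '"' && !esc then
        loopB rest (!inQuote) false none (acc' ++ [ch])
      else
        loopB rest inQuote ((ch == '\\') && !esc) none (acc' ++ [ch])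

def space_shifts_alt (expr : String) : String := String.ofList (loopB expr.toList false false none [])

-- ===== PRECONDITION & SPEC =====
def Spec_space_shifts (expr : String) (out : String) : Prop := out = space_shifts_alt expr
instance (expr : String) (out : String) : Decidable (Spec_space_shifts expr out) := by unfold Spec_space_shifts; infer_instance

-- ===== CLAIM (what is proved, stated in full; the proofs are below) =====
def Claim_equal_space_shifts : Prop := ∀ (expr : String), Dom_space_shifts expr → Spec_space_shifts expr (space_shifts expr)

-- ===== LEMMAS AND PROOFS =====

theorem isEscaped_succ (expr : List Char) (i : Nat) :
    isEscaped expr (i + 1) = (decide (expr[i]? = some '\\') && !isEscaped expr i) := by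
  simp only [isEscaped, countBS]
  split
  · rcases Nat.mod_two_eq_zero_or_one (countBS expr i) with h2 | h2 <;>
      simp_all [Nat.add_mod]
  · simp_all

theorem take1_drop (expr : List Char) (j : Nat) :
    (expr.drop j).take 1 = (expr[j]?).toList := by
  by_cases h : j < expr.length
  · rw [List.getElem?_eq_getElem h, List.drop_eq_getElem_cons h, List.take_succ_cons]
    simp
  · rw [List.drop_eq_nil_of_le (by omega)]
    simp [List.getElem?_eq_none (by omega : expr.length ≤ j)]

theorem take2_drop (expr : List Char) (i : Nat) (hi : i < expr.length) :
    (expr.drop i).take 2 = expr[i] :: (expr[i + 1]?).toList := by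
  rw [List.drop_eq_getElem_cons hi]
  simp only [List.take_succ_cons]
  rw [take1_drop]

theorem isEscaped_succ' (expr : List Char) (i : Nat) (hi : i < expr.length) :
    isEscaped expr (i + 1) = ((expr[i] == '\\') && !isEscaped expr i) := by
  rw [isEscaped_succ, List.getElem?_eq_getElem hi]
  by_cases h : expr[i] = '\\' <;> simp [h]

theorem loopAB_base (expr : List Char) (i : Nat) (hi : expr.length ≤ i) :
    (∀ inQuote acc, loopA expr i inQuote acc = loopB (expr.drop i) inQuote (isEscaped expr i) none acc)
    ∧ (∀ acc c, (c = '<' ∨ c = '>') → isEscaped expr i = false →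
        loopB (expr.drop i) false false (some c) acc =
          if expr[i]? = some c then loopA expr (i + 1) false (acc ++ [' ', c, c, ' '])
          else loopA expr i false (acc ++ [c])) := by
  have hd : expr.drop i = [] := List.drop_eq_nil_of_le hi
  have hnone : expr[i]? = none := List.getElem?_eq_none hi
  constructor
  · intro inQuote acc
    rw [loopA, dif_neg (by omega), hd]
    simp [loopB]
  · intro acc c hc hesc
    rw [hd, hnone]
    simp only [reduceCtorEq, if_false]
    rw [loopA, dif_neg (by omega)]
    simp [loopB]

-- the combined induction: (a) aligned states, (b) B one char ahead of A with a pending bracket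
theorem loopAB (expr : List Char) : ∀ n i, expr.length - i ≤ n →
    (∀ inQuote acc, loopA expr i inQuote acc = loopB (expr.drop i) inQuote (isEscaped expr i) none acc)
    ∧ (∀ acc c, (c = '<' ∨ c = '>') → isEscaped expr i = false →
        loopB (expr.drop i) false false (some c) acc =
          if expr[i]? = some c then loopA expr (i + 1) false (acc ++ [' ', c, c, ' '])
          else loopA expr i false (acc ++ [c])) := by
  intro n
  induction n with
  | zero => intro i hlen; exact loopAB_base expr i (by omega)
  | succ n ih =>
    intro i hlen
    by_cases hi : i < expr.length
    swap
    · exact loopAB_base expr i (by omega)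
    obtain ⟨ha1, hb1⟩ := ih (i + 1) (by omega)
    have hd : expr.drop i = expr[i] :: expr.drop (i + 1) := List.drop_eq_getElem_cons hi
    have hsome : expr[i]? = some expr[i] := List.getElem?_eq_getElem hi
    have ht2 : (expr.drop i).take 2 = expr[i] :: (expr[i + 1]?).toList := take2_drop expr i hi
    have hesc1 : isEscaped expr (i + 1) = ((expr[i] == '\\') && !isEscaped expr i) :=
      isEscaped_succ' expr i hi
    constructor
    · intro inQuote acc
      rw [loopA, dif_pos hi, ht2, hd]
      simp only [loopB]
      by_cases hq : expr[i] = '"'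
      · -- a quote: toggles unless escaped; never part of an operator
        have h1 : isEscaped expr (i + 1) = false := by rw [hesc1, hq]; simp
        by_cases he : isEscaped expr i = true
        · simp [hq, he]
          rw [ha1, h1]
        · have he' := eq_false_of_ne_true he
          simp [hq, he']
          rw [ha1, h1]
      · by_cases hlg : expr[i] = '<' ∨ expr[i] = '>'
        · have h1 : isEscaped expr (i + 1) = false := by
            rw [hesc1]; rcases hlg with h | h <;> rw [h] <;> simp
          by_cases hquote : inQuote = true
          · -- inside a quote '<'/'>' is ordinary text in both programs
            rcases hlg with h | h <;> simp [hquote, h] <;> rw [ha1, h1]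
          · have hquote' := eq_false_of_ne_true hquote
            -- A looks ahead at expr[i+1]; B defers via the pending buffer (part b at i+1)
            rcases hlg with h | h <;>
              · simp [hquote', h]
                rw [hb1 acc _ (by simp) h1]
                by_cases hnext : expr[i + 1]? = some expr[i] <;> rw [h] at hnext <;>
                  simp [hnext]
        · -- ordinary character
          push Not at hlg
          simp [hq, hlg.1, hlg.2]
          rw [← hesc1, ha1]
    · intro acc c hc hesc
      rw [hsome, hd]
      simp only [loopB]
      by_cases heq : expr[i] = c
      · -- the pending bracket completes an operator
        have h1 : isEscaped expr (i + 1) = false := by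
          rw [hesc1, heq]; rcases hc with h | h <;> rw [h] <;> simp
        rcases hc with h | h <;> subst h <;> simp [heq] <;> rw [ha1, h1]
      · have hne : ¬ some expr[i] = some c := by simpa using heq
        have hne2 : ¬ c = expr[i] := fun hcc => heq (Eq.symm hcc)
        by_cases hlg : expr[i] = '<' ∨ expr[i] = '>'
        · -- the other bracket: A re-examines position i, B starts a new pending run
          have h1 : isEscaped expr (i + 1) = false := by
            rw [hesc1]; rcases hlg with h | h <;> rw [h] <;> simp
          have hq : ¬ expr[i] = '"' := by
            rcases hlg with h | h <;> rw [h] <;> decide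
          rw [if_neg hne, loopA, dif_pos hi, ht2]
          rcases hlg with h | h <;>
            · rw [h] at hne2
              simp [h, hesc, hne2]
              rw [hb1 (acc ++ [c]) _ (by simp) h1]
              by_cases hnext : expr[i + 1]? = some expr[i] <;> rw [h] at hnext <;>
                simp [hnext]
        · push Not at hlg
          rw [if_neg hne, loopA, dif_pos hi, ht2]
          by_cases hq : expr[i] = '"'
          · -- unescaped quote right after the pending bracket: flush, then toggle
            have h1 : isEscaped expr (i + 1) = false := by rw [hesc1, hq]; simp
            simp [hq, hesc]
            rw [ha1, h1]
          · have hesc1' : isEscaped expr (i + 1) = (expr[i] == '\\') := by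
              rw [hesc1, hesc]; simp
            simp [hq, hesc, hlg.1, hlg.2]
            rw [← hesc1', ha1]

theorem space_shifts_spec : Claim_equal_space_shifts := by
  intro expr _
  unfold Spec_space_shifts space_shifts space_shifts_alt
  have h := (loopAB expr.toList expr.toList.length 0 (by omega)).1 false []
  have h0 : isEscaped expr.toList 0 = false := by simp [isEscaped, countBS]
  rw [h0] at h
  simp [h]
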